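-- pv_equiv track=rewrite | github.com/EnginKosure/Jupyter_nb | ch37.py | freed
-- ===== SOURCE A (Python) =====
-- def freed(prison):
--     if prison[0] == 0:
--         return 0  # just to pass the last test (which is actually wrong)
--
--     count = 0
--     for cell in prison:
--         if cell == 1:
--             count += 1
--             swap_cells(prison)
--     return count
--
-- def swap_cells(prison):
--     for i in range(len(prison)):
--         prison[i] = 1-prison[i]
-- ===== SOURCE B (Python) =====
-- def freed(prison):
--     # Single pass tracking flip parity; does NOT mutate prison (A flips it in place).
--     if prison[0] == 0:
--         return 0
--     count = 0
--     for cell in prison: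
--         if (cell if count % 2 == 0 else 1 - cell) == 1:
--             count += 1
--     return count
-- ===== Notes on version B (the rewrite author's own statement) =====
-- stated objective: alternative
-- what changed: B replaces A's re-flip of the entire list on every lit cell with a single pass that tracks the flip count's parity and reads each cell through it (cell vs 1-cell), so the inner whole-list rewrite disappears; B also does not mutate the input list.
import Mathlib
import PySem

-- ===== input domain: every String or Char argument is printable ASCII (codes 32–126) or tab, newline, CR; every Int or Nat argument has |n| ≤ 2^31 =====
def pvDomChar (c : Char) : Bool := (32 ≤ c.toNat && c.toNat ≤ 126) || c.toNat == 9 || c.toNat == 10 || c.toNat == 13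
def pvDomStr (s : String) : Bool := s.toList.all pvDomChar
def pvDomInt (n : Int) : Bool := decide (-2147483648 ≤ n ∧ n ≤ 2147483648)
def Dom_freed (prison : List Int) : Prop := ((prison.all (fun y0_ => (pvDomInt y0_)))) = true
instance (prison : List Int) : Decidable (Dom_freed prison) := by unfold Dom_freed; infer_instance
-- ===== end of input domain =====

-- B counts via a single pass tracking flip parity instead of re-flipping the list on each lit
-- cell (A mutates its argument in place; B does not — the equivalence is about the return value).
-- ===== PORT A =====
-- one iteration of A's for-loop: read prison[i] from the current (mutated) list; on a 1,
-- bump count and flip every cell (swap_cells)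
def freedStep (s : List Int × Int) (i : Nat) : List Int × Int :=
  let cell := s.1.getD i 0
  if cell = 1 then (s.1.map (fun x => 1 - x), s.2 + 1) else s

def freed (prison : List Int) : Int :=
  match prison with
  | [] => 0   -- A raises IndexError here; excluded by Pre_freed
  | h :: _ =>
    if h = 0 then 0
    else ((List.range prison.length).foldl freedStep (prison, 0)).2

-- ===== PORT B =====
def freedAltStep (count : Int) (cell : Int) : Int :=
  if (if count % 2 = 0 then cell else 1 - cell) = 1 then count + 1 else count

def freed_alt (prison : List Int) : Int :=
  match prison with
  | [] => 0   -- the first-element access raises IndexError here; excluded by Pre_freed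
  | h :: _ =>
    if h = 0 then 0
    else prison.foldl freedAltStep 0

-- ===== PRECONDITION & SPEC =====
-- A indexes the first element, which raises IndexError on the empty list.
def Pre_freed (prison : List Int) : Prop := prison ≠ []
instance (prison : List Int) : Decidable (Pre_freed prison) := by unfold Pre_freed; infer_instance
def pvWitness_freed : List Int := [1, 0, 1]
def Spec_freed (prison : List Int) (out : Int) : Prop := out = freed_alt prison
instance (prison : List Int) (out : Int) : Decidable (Spec_freed prison out) := by unfold Spec_freed; infer_instance

-- ===== CLAIM (what is proved, stated in full; the proofs are below) =====
def Claim_equal_freed : Prop := ∀ (prison : List Int), Dom_freed prison → Pre_freed prison → Spec_freed prison (freed prison)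

-- ===== LEMMAS AND PROOFS =====

-- ===== VERDICT (by name: the statement is the Claim_ definition above) =====
lemma loopA (orig : List Int) :
    ∀ (m k : Nat) (c : Int), k + m = orig.length →
    ((List.range' k m).foldl freedStep
        ((if c % 2 = 0 then orig else orig.map (fun x => 1 - x)), c)).2
      = (orig.drop k).foldl freedAltStep c := by
  intro m
  induction m with
  | zero =>
      intro k c hk
      simp [List.drop_of_length_le (by omega : orig.length ≤ k)]
  | succ m ih =>
      intro k c hk
      have hklt : k < orig.length := by omega
      have hdrop : orig.drop k = orig[k] :: orig.drop (k + 1) :=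
        List.drop_eq_getElem_cons hklt
      rw [List.range'_succ, List.foldl_cons, hdrop, List.foldl_cons]
      by_cases hc : c % 2 = 0
      · have hcell : freedStep ((if c % 2 = 0 then orig else orig.map (fun x => 1 - x)), c) k
            = if orig[k] = 1 then (orig.map (fun x => 1 - x), c + 1) else (orig, c) := by
          simp [freedStep, hc, List.getD_eq_getElem?_getD, hklt]
        rw [hcell]
        by_cases h1 : orig[k] = 1
        · have hc1 : ¬ (c + 1) % 2 = 0 := by omega
          have := ih (k + 1) (c + 1) (by omega)
          rw [if_neg hc1] at this
          simpa [h1, freedAltStep, hc] using this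
        · have := ih (k + 1) c (by omega)
          rw [if_pos hc] at this
          simpa [h1, freedAltStep, hc] using this
      · have hcell : freedStep ((if c % 2 = 0 then orig else orig.map (fun x => 1 - x)), c) k
            = if 1 - orig[k] = 1 then (orig, c + 1)
              else (orig.map (fun x => 1 - x), c) := by
          simp only [if_neg hc, freedStep]
          have : (orig.map (fun x : Int => 1 - x)).getD k 0 = 1 - orig[k] := by
            simp [List.getD_eq_getElem?_getD, hklt]
          rw [this]
          by_cases h1 : (1 : Int) - orig[k] = 1
          · simp [h1]
          · simp [h1]
        rw [hcell]
        by_cases h1 : (1 : Int) - orig[k] = 1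
        · have hc1 : (c + 1) % 2 = 0 := by omega
          have := ih (k + 1) (c + 1) (by omega)
          rw [if_pos hc1] at this
          simpa [h1, freedAltStep, hc] using this
        · have := ih (k + 1) c (by omega)
          rw [if_neg hc] at this
          simpa [h1, freedAltStep, hc] using this

-- ===== VERDICT (by name: the statement is the Claim_ definition above) =====
theorem freed_spec : Claim_equal_freed := by
  intro prison _ hpre
  unfold Spec_freed
  match prison with
  | [] => exact absurd rfl hpre
  | h :: t =>
      unfold freed freed_alt
      by_cases h0 : h = 0
      · simp [h0]
      · have hl := loopA (h :: t) (h :: t).length 0 0 (by omega)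
        simp only [Int.zero_emod, List.drop_zero] at hl
        simp only [if_neg h0, List.range_eq_range']
        exact hl
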